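-- pv_equiv track=rewrite | github.com/manuo1/housebrain | backend/consumption/utils.py | find_all_missing_value_zones
-- ===== SOURCE A (Python) =====
-- def find_all_missing_value_zones(
--     data_dict: dict[str, int | None],
-- ) -> list[list[tuple[str, int | None]]] | None:
--     """
--     Identifies all zones of consecutive missing (None) values in a time-sorted dictionary,
--     where each zone is framed by non-None values at the start and end.
--
--     Args:
--         data_dict: Dictionary where keys are time strings ("HH:MM") and values are int or None.
--
--     Returns:
--         A list of zones (each zone is a list of (time, value) tuples), including the
--         known value just before and after the None values. Returns None if no such zones exist.
--     """
--     items = sorted(data_dict.items())  # Ensure chronological order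
--     zones: list[list[tuple[str, int | None]]] = []
--     current_zone: list[tuple[str, int | None]] = []
--
--     for i in range(1, len(items)):
--         prev_time, prev_value = items[i - 1]
--         curr_time, curr_value = items[i]
--
--         if not current_zone and curr_value is None and prev_value is not None:
--             # Start of a missing zone
--             current_zone = [(prev_time, prev_value), (curr_time, curr_value)]
--
--         elif current_zone:
--             current_zone.append((curr_time, curr_value))
--             if curr_value is not None:
--                 # End of zone
--                 zones.append(current_zone)
--                 current_zone = []
--
--     return zones if zones else None
-- ===== SOURCE B (Python) =====
-- def find_all_missing_value_zones(data_dict):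
--     items = sorted(data_dict.items())
--     zones = []
--     i, n = 0, len(items)
--     while i < n:
--         if items[i][1] is None:
--             i += 1
--             continue
--         j = i + 1
--         while j < n and items[j][1] is None:
--             j += 1
--         if j == n:
--             break
--         if j > i + 1:
--             zones.append(items[i:j + 1])
--         i = j
--     return zones or None
-- ===== Notes on version B (the rewrite author's own statement) =====
-- stated objective: alternative
-- what changed: A's single pass over adjacent index pairs with a mutable current_zone state machine is replaced by an index loop that, at each known value, scans the following run of Nones with an inner loop and slices the whole bounded zone out at once.
import Mathlib
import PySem

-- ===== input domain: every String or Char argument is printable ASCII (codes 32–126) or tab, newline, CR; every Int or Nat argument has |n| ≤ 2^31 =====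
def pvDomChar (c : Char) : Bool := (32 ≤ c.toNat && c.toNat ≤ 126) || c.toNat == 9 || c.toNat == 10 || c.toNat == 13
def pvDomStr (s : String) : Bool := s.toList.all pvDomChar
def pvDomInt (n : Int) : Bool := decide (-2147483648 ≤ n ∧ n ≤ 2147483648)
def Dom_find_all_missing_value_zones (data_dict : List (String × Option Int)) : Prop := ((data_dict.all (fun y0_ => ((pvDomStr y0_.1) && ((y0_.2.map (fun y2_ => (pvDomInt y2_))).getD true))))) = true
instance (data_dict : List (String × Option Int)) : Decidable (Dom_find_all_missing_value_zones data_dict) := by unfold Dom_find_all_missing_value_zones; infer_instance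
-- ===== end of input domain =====

-- B replaces A's stateful current_zone machine (one pass over adjacent index pairs) by an
-- index loop that, at each known value, scans the following run of Nones in an inner loop
-- and slices the whole zone out at once (objective: alternative decomposition, same cost).

-- ===== PORT A =====
-- sorted(data_dict.items()): dict keys are distinct, so Python's tuple sort never compares
-- the (possibly None) second components; sorting by the key alone is exact.
def find_all_missing_value_zones (data_dict : List (String × Option Int)) : Option (List (List (String × Option Int))) :=
  let items := PySem.List.sorted (PySem.Dict.ofList data_dict).items (fun p => p.1) false
  let res := (PySem.List.pyRange 1 (items.length : Int) 1).foldl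
    (fun (st : List (List (String × Option Int)) × List (String × Option Int)) i =>
      let prev := PySem.List.pyGetD items (i - 1) ("", none)
      let curr := PySem.List.pyGetD items i ("", none)
      if st.2 = [] ∧ curr.2 = none ∧ ¬ prev.2 = none then (st.1, [prev, curr])
      else if ¬ st.2 = [] then
        if ¬ curr.2 = none then (st.1 ++ [st.2 ++ [curr]], [])
        else (st.1, st.2 ++ [curr])
      else (st.1, st.2)) ([], [])
  if res.1 = [] then none else some res.1

-- ===== PORT B =====
-- inner `while j < n and items[j][1] is None: j += 1`
def pvScanB (items : List (String × Option Int)) (j : Nat) : Nat :=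
  if h : j < items.length then
    if (items[j]).2 = none then pvScanB items (j + 1) else j
  else j
termination_by items.length - j

theorem pvScanB_ge (items : List (String × Option Int)) (j : Nat) : j ≤ pvScanB items j := by
  unfold pvScanB
  split
  · split
    · exact le_trans (Nat.le_succ j) (pvScanB_ge items (j + 1))
    · exact le_refl j
  · exact le_refl j
termination_by items.length - j

-- outer `while i < n` loop with the zones accumulator
def pvLoopB (items : List (String × Option Int)) (zones : List (List (String × Option Int))) (i : Nat) : List (List (String × Option Int)) :=
  if h : i < items.length then
    if (items[i]).2 = none then pvLoopB items zones (i + 1)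
    else if pvScanB items (i + 1) = items.length then zones
    else if i + 1 < pvScanB items (i + 1) then
      pvLoopB items (zones ++ [PySem.List.slice items (some (i : Int)) (some ((pvScanB items (i + 1) : Int) + 1))]) (pvScanB items (i + 1))
    else pvLoopB items zones (pvScanB items (i + 1))
  else zones
termination_by items.length - i
decreasing_by
  · omega
  · have := pvScanB_ge items (i + 1); omega
  · have := pvScanB_ge items (i + 1); omega

def find_all_missing_value_zones_alt (data_dict : List (String × Option Int)) : Option (List (List (String × Option Int))) :=
  let items := PySem.List.sorted (PySem.Dict.ofList data_dict).items (fun p => p.1) false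
  let zones := pvLoopB items [] 0
  if zones = [] then none else some zones

-- ===== PRECONDITION & SPEC =====
def Spec_find_all_missing_value_zones (data_dict : List (String × Option Int)) (out : Option (List (List (String × Option Int)))) : Prop := out = find_all_missing_value_zones_alt data_dict
instance (data_dict : List (String × Option Int)) (out : Option (List (List (String × Option Int)))) : Decidable (Spec_find_all_missing_value_zones data_dict out) := by unfold Spec_find_all_missing_value_zones; infer_instance

-- ===== CLAIM (what is proved, stated in full; the proofs are below) =====
def Claim_equal_find_all_missing_value_zones : Prop := ∀ (data_dict : List (String × Option Int)), Dom_find_all_missing_value_zones data_dict → Spec_find_all_missing_value_zones data_dict (find_all_missing_value_zones data_dict)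

-- ===== LEMMAS AND PROOFS =====

-- reference zone list of a sorted items list, by structural recursion
def pvZones : List (String × Option Int) → List (List (String × Option Int))
  | [] => []
  | x :: rest =>
    if x.2 = none then pvZones rest
    else
      let rest' := rest.dropWhile (fun p => p.2.isNone)
      if hr : rest' = [] then []
      else if rest.takeWhile (fun p => p.2.isNone) = [] then pvZones rest'
      else (x :: (rest.takeWhile (fun p => p.2.isNone) ++ [rest'.head hr])) :: pvZones rest'
termination_by l => l.length
decreasing_by
  all_goals simp only [List.length_cons]
  all_goals have hle := List.length_dropWhile_le (p := fun p : String × Option Int => p.2.isNone) (l := rest)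
  all_goals omega

-- A's loop rewritten over the parade of (prev, curr) elements
def pvLoopA (zones : List (List (String × Option Int))) (cur : List (String × Option Int)) (prev : String × Option Int) : List (String × Option Int) → List (List (String × Option Int)) × List (String × Option Int)
  | [] => (zones, cur)
  | c :: rest =>
    if cur = [] ∧ c.2 = none ∧ ¬ prev.2 = none then pvLoopA zones [prev, c] c rest
    else if ¬ cur = [] then
      if ¬ c.2 = none then pvLoopA (zones ++ [cur ++ [c]]) [] c rest
      else pvLoopA zones (cur ++ [c]) c rest
    else pvLoopA zones cur c rest

-- result contributed by A's loop when a zone `cur` (last element = prev, prev None) is open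
def pvRunRes (cur : List (String × Option Int)) (rest : List (String × Option Int)) : List (List (String × Option Int)) :=
  let rest' := rest.dropWhile (fun p => p.2.isNone)
  if hr : rest' = [] then []
  else (cur ++ rest.takeWhile (fun p => p.2.isNone) ++ [rest'.head hr]) :: pvZones rest'

theorem pvLoopA_spec (n : Nat) : ∀ (rest : List (String × Option Int)), rest.length ≤ n →
    (∀ zones prev, (pvLoopA zones [] prev rest).1 = zones ++ pvZones (prev :: rest)) ∧
    (∀ zones cur prev, ¬ cur = [] → prev.2 = none →
      (pvLoopA zones cur prev rest).1 = zones ++ pvRunRes cur rest) := by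
  induction n with
  | zero =>
    intro rest hlen
    have hr : rest = [] := List.eq_nil_of_length_eq_zero (by omega)
    subst hr
    constructor
    · intro zones prev
      by_cases hp : prev.2 = none
      · simp [pvLoopA, pvZones, hp]
      · simp [pvLoopA, pvZones, hp]
    · intro zones cur prev hcur hprev
      simp [pvLoopA, pvRunRes]
  | succ n ih =>
    intro rest hlen
    cases rest with
    | nil =>
      constructor
      · intro zones prev
        by_cases hp : prev.2 = none
        · simp [pvLoopA, pvZones, hp]
        · simp [pvLoopA, pvZones, hp]
      · intro zones cur prev hcur hprev
        simp [pvLoopA, pvRunRes]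
    | cons c rest' =>
      have h' := ih rest' (by simp at hlen; omega)
      constructor
      · intro zones prev
        by_cases hp : prev.2 = none
        · have e : pvLoopA zones [] prev (c :: rest') = pvLoopA zones [] c rest' := by
            simp [pvLoopA, hp]
          rw [e, h'.1 zones c]
          conv_rhs => rw [pvZones, if_pos hp]
        · by_cases hc : c.2 = none
          · have e : pvLoopA zones [] prev (c :: rest') = pvLoopA zones [prev, c] c rest' := by
              simp [pvLoopA, hp, hc]
            rw [e, h'.2 zones [prev, c] c (by simp) hc]
            conv_rhs => rw [pvZones, if_neg hp]
            unfold pvRunRes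
            simp only [List.dropWhile_cons, List.takeWhile_cons, hc, Option.isNone_none,
              if_pos, ite_true]
            by_cases hdw : rest'.dropWhile (fun p => p.2.isNone) = []
            · simp [hdw, hc]
            · simp [hdw, hc]
          · have e : pvLoopA zones [] prev (c :: rest') = pvLoopA zones [] c rest' := by
              simp [pvLoopA, hp, hc]
            rw [e, h'.1 zones c]
            conv_rhs => rw [pvZones, if_neg hp]
            simp [List.dropWhile_cons, List.takeWhile_cons, hc]
      · intro zones cur prev hcur hprev
        by_cases hc : c.2 = none
        · have e : pvLoopA zones cur prev (c :: rest') = pvLoopA zones (cur ++ [c]) c rest' := by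
            simp [pvLoopA, hcur, hc]
          rw [e, h'.2 zones (cur ++ [c]) c (by simp) hc]
          unfold pvRunRes
          by_cases hdw : rest'.dropWhile (fun p => p.2.isNone) = []
          · simp [hdw, hc]
          · simp [hdw, hc]
        · have e : pvLoopA zones cur prev (c :: rest') = pvLoopA (zones ++ [cur ++ [c]]) [] c rest' := by
            simp [pvLoopA, hcur, hc]
          rw [e, h'.1 (zones ++ [cur ++ [c]]) c]
          unfold pvRunRes
          simp [hc]

theorem pvFoldA (items : List (String × Option Int)) : ∀ (m k : Nat), items.length ≤ k + m → ∀ (hk : k < items.length),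
    ∀ (st : List (List (String × Option Int)) × List (String × Option Int)),
    (PySem.List.pyRange ((k : Int) + 1) (items.length : Int) 1).foldl
      (fun (st : List (List (String × Option Int)) × List (String × Option Int)) i =>
        let prev := PySem.List.pyGetD items (i - 1) ("", none)
        let curr := PySem.List.pyGetD items i ("", none)
        if st.2 = [] ∧ curr.2 = none ∧ ¬ prev.2 = none then (st.1, [prev, curr])
        else if ¬ st.2 = [] then
          if ¬ curr.2 = none then (st.1 ++ [st.2 ++ [curr]], [])
          else (st.1, st.2 ++ [curr])
        else (st.1, st.2)) st
    = pvLoopA st.1 st.2 (items[k]'hk) (items.drop (k + 1)) := by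
  intro m
  induction m with
  | zero => intro k hm hk; omega
  | succ m ih =>
    intro k hm hk st
    by_cases hk1 : k + 1 < items.length
    · have hcons : PySem.List.pyRange ((k : Int) + 1) (items.length : Int) 1
          = ((k : Int) + 1) :: PySem.List.pyRange ((k : Int) + 1 + 1) (items.length : Int) 1 :=
        PySem.List.pyRange_one_cons (by push_cast; omega)
      have hprev : PySem.List.pyGetD items ((k : Int) + 1 - 1) ("", none) = items[k] := by
        have h1 : ((k : Int) + 1 - 1) = ((k : Nat) : Int) := by ring
        rw [h1, PySem.List.pyGetD_natCast]
        exact List.getD_eq_getElem _ _ hk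
      have hcurr : PySem.List.pyGetD items ((k : Int) + 1) ("", none) = items[k + 1] := by
        have h1 : ((k : Int) + 1) = (((k + 1 : Nat)) : Int) := by push_cast; ring
        rw [h1, PySem.List.pyGetD_natCast]
        exact List.getD_eq_getElem _ _ hk1
      have hc2 : ((k : Int) + 1 + 1) = (((k + 1 : Nat)) : Int) + 1 := by push_cast; ring
      have hdk : items.drop (k + 1) = items[k + 1] :: items.drop (k + 1 + 1) := List.drop_eq_getElem_cons hk1
      rw [hcons, List.foldl_cons, hdk, pvLoopA]
      simp only [hprev, hcurr]
      rw [hc2]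
      split_ifs
      all_goals exact ih (k + 1) (by omega) hk1 _
    · have hnil : PySem.List.pyRange ((k : Int) + 1) (items.length : Int) 1 = [] :=
        PySem.List.pyRange_one_eq_nil (by push_cast; omega)
      have hdk : items.drop (k + 1) = [] := List.drop_eq_nil_of_le (by omega)
      rw [hnil, hdk]
      simp [pvLoopA]

theorem pvDropTakeWhile {α : Type} (p : α → Bool) : ∀ (l : List α), l.drop (l.takeWhile p).length = l.dropWhile p := by
  intro l
  induction l with
  | nil => simp
  | cons x xs ih =>
    by_cases hx : p x = true
    · simpa [hx] using ih
    · simp [hx]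

theorem pvScanB_spec (items : List (String × Option Int)) : ∀ (m j : Nat), items.length ≤ j + m →
    pvScanB items j = j + ((items.drop j).takeWhile (fun p => p.2.isNone)).length := by
  intro m
  induction m with
  | zero =>
    intro j hj
    have hd : items.drop j = [] := List.drop_eq_nil_of_le (by omega)
    unfold pvScanB
    rw [hd]
    simp
    omega
  | succ m ih =>
    intro j hj
    by_cases hlt : j < items.length
    · have hd : items.drop j = items[j] :: items.drop (j + 1) := List.drop_eq_getElem_cons hlt
      unfold pvScanB
      rw [hd]
      by_cases hn : (items[j]).2 = none
      · have h1 : (List.takeWhile (fun p : String × Option Int => p.2.isNone) (items.drop j)).length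
            = (List.takeWhile (fun p : String × Option Int => p.2.isNone) (items.drop (j + 1))).length + 1 := by
          rw [hd, List.takeWhile_cons]
          simp [hn]
        simp [hlt, hn, ih (j + 1) (by omega)]
        omega
      · simp [hlt, hn, Option.isNone_iff_eq_none]
    · have hd : items.drop j = [] := List.drop_eq_nil_of_le (by omega)
      unfold pvScanB
      rw [hd]
      simp
      omega

theorem pvLoopB_spec (items : List (String × Option Int)) : ∀ (m i : Nat) (zones : List (List (String × Option Int))), items.length ≤ i + m →
    pvLoopB items zones i = zones ++ pvZones (items.drop i) := by
  intro m
  induction m with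
  | zero =>
    intro i zones hi
    have hd : items.drop i = [] := List.drop_eq_nil_of_le (by omega)
    unfold pvLoopB
    rw [hd]
    have : ¬ i < items.length := by omega
    simp [this, pvZones]
  | succ m ih =>
    intro i zones hi
    by_cases hlt : i < items.length
    · have hd : items.drop i = items[i] :: items.drop (i + 1) := List.drop_eq_getElem_cons hlt
      by_cases hn : (items[i]).2 = none
      · -- skip a leading None
        have hz : pvZones (items.drop i) = pvZones (items.drop (i + 1)) := by
          rw [hd, pvZones, if_pos hn]
        unfold pvLoopB
        simp only [dif_pos hlt, if_pos hn]
        rw [ih (i + 1) zones (by omega), hz]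
      · -- known value: scan the None run
        have hscan := pvScanB_spec items items.length (i + 1) (by omega)
        set run := (items.drop (i + 1)).takeWhile (fun p => p.2.isNone) with hrun
        have hrle : run.length ≤ items.length - (i + 1) := by
          have h1 : run.length ≤ (items.drop (i + 1)).length :=
            (List.takeWhile_prefix _).length_le
          simpa using h1
        have hjle : pvScanB items (i + 1) ≤ items.length := by omega
        have hdropj : items.drop (pvScanB items (i + 1)) = (items.drop (i + 1)).dropWhile (fun p => p.2.isNone) := by
          rw [hscan, ← List.drop_drop, hrun, pvDropTakeWhile]
        by_cases hjn : pvScanB items (i + 1) = items.length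
        · -- run reaches the end: no zone, loop breaks
          have hres : (items.drop (i + 1)).dropWhile (fun p => p.2.isNone) = [] := by
            rw [← hdropj, hjn]
            exact List.drop_eq_nil_of_le (by omega)
          have hz0 : pvZones (items.drop i) = [] := by
            rw [hd, pvZones, if_neg hn]
            simp [hres]
          unfold pvLoopB
          simp [hlt, hn, hjn, hz0]
        · have hjlt : pvScanB items (i + 1) < items.length := by omega
          have hne : (items.drop (i + 1)).dropWhile (fun p => p.2.isNone) ≠ [] := by
            rw [← hdropj]
            intro hc
            have := congrArg List.length hc
            simp at this
            omega
          by_cases hrun0 : i + 1 < pvScanB items (i + 1)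
          · -- a real zone: slice it out
            have hrne : run ≠ [] := by
              intro hc
              rw [hc] at hscan
              simp at hscan
              omega
            have hslice : PySem.List.slice items (some (i : Int)) (some ((pvScanB items (i + 1) : Int) + 1))
                = items[i] :: (run ++ [((items.drop (i + 1)).dropWhile (fun p => p.2.isNone)).head hne]) := by
              have hcast : ((pvScanB items (i + 1) : Int) + 1) = (((pvScanB items (i + 1) + 1 : Nat)) : Int) := by
                push_cast
                ring
              rw [hcast, PySem.List.slice_natCast, hd]
              have harith : pvScanB items (i + 1) + 1 - i = (run.length + 1) + 1 := by omega
              rw [harith, List.take_succ_cons]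
              have hsplit : items.drop (i + 1) = run ++ (items.drop (i + 1)).dropWhile (fun p => p.2.isNone) := by
                rw [hrun]
                exact List.takeWhile_append_dropWhile.symm
              conv_lhs => rw [hsplit]
              rw [List.take_append]
              have h2 : run.length + 1 - run.length = 1 := by omega
              rw [List.take_of_length_le (by omega), h2, List.take_one, List.head?_eq_head hne]
              rfl
            unfold pvLoopB
            rw [ih (pvScanB items (i + 1)) (zones ++ [PySem.List.slice items (some (i : Int)) (some ((pvScanB items (i + 1) : Int) + 1))]) (by omega)]
            rw [hslice, hdropj]
            have hz : pvZones (items.drop i)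
                = (items[i] :: (run ++ [((items.drop (i + 1)).dropWhile (fun p => p.2.isNone)).head hne]))
                  :: pvZones ((items.drop (i + 1)).dropWhile (fun p => p.2.isNone)) := by
              rw [hd]
              rw [pvZones]
              rw [if_neg hn]
              simp only [← hrun]
              rw [dif_neg hne, if_neg hrne]
            rw [hz]
            simp [hlt, hn, hjn, hrun0]
          · -- no None after the known value
            have hj1 : pvScanB items (i + 1) = i + 1 := by
              have := pvScanB_ge items (i + 1)
              omega
            have hrun_nil : run = [] := by
              rw [hj1] at hscan
              have : run.length = 0 := by omega
              exact List.eq_nil_of_length_eq_zero this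
            have hdw : (items.drop (i + 1)).dropWhile (fun p => p.2.isNone) = items.drop (i + 1) := by
              rw [← hdropj, hj1]
            unfold pvLoopB
            rw [ih (pvScanB items (i + 1)) zones (by omega)]
            have hz : pvZones (items.drop i) = pvZones (items.drop (i + 1)) := by
              rw [hd, pvZones, if_neg hn]
              simp only [← hrun]
              rw [dif_neg hne, if_pos hrun_nil, hdw]
            have hne2 : ¬ i + 1 = items.length := by
              rw [← hj1]
              exact hjn
            rw [hz, hj1]
            simp [hlt, hn, hne2, hrun0, hj1]
    · have hd : items.drop i = [] := List.drop_eq_nil_of_le (by omega)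
      unfold pvLoopB
      rw [hd]
      simp [hlt, pvZones]

theorem pvAeqZ (items : List (String × Option Int)) :
    ((PySem.List.pyRange 1 (items.length : Int) 1).foldl
      (fun (st : List (List (String × Option Int)) × List (String × Option Int)) i =>
        let prev := PySem.List.pyGetD items (i - 1) ("", none)
        let curr := PySem.List.pyGetD items i ("", none)
        if st.2 = [] ∧ curr.2 = none ∧ ¬ prev.2 = none then (st.1, [prev, curr])
        else if ¬ st.2 = [] then
          if ¬ curr.2 = none then (st.1 ++ [st.2 ++ [curr]], [])
          else (st.1, st.2 ++ [curr])
        else (st.1, st.2)) ([], [])).1 = pvZones items := by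
  cases items with
  | nil =>
    rw [PySem.List.pyRange_one_eq_nil (by norm_num)]
    simp [pvZones]
  | cons x rest =>
    have hf := pvFoldA (x :: rest) (x :: rest).length 0 (by omega) (by simp) ([], [])
    have e : ((0 : Nat) : Int) + 1 = (1 : Int) := by norm_num
    rw [e] at hf
    rw [hf]
    have h2 := (pvLoopA_spec rest.length rest (le_refl _)).1 [] x
    simpa using h2

theorem pvBeqZ (items : List (String × Option Int)) : pvLoopB items [] 0 = pvZones items := by
  have h := pvLoopB_spec items items.length 0 [] (by omega)
  simpa using h

theorem find_all_missing_value_zones_spec : Claim_equal_find_all_missing_value_zones := by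
  intro data_dict _
  unfold Spec_find_all_missing_value_zones find_all_missing_value_zones find_all_missing_value_zones_alt
  simp only [pvAeqZ, pvBeqZ]
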